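-- pv_equiv track=rewrite | github.com/Austin-Fulbright/alg_test | max-node-sum/solution_1.py | evenSubsetMax
-- ===== SOURCE A (Python) =====
-- def merge(left, right):
--     merge_a = []
--     i = j = 0
--     while i < len(left) and j < len(right):
--         if left[i] >= right[j]:
--             merge_a.append(left[i])
--             i+=1
--         else:
--             merge_a.append(right[j])
--             j+=1
--     if i < len(left):
--         merge_a.extend(left[i:])
--     if j < len(right):
--         merge_a.extend(right[j:])
--     return merge_a
--
-- def mergesort(array):
--     if len(array) <= 1:
--         return array
--     m = len(array) // 2
--     left = mergesort(array[:m])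
--     right = mergesort(array[m:])
--
--     return merge(left, right)
--
-- def evenSubsetMax(nums):
--     numsSorted = mergesort(nums)
--     maxnum = 0
--     current = 0
--     for i in range(len(nums)):
--         current+=numsSorted[i]
--         if (i + 1) % 2 == 0:
--             maxnum = max(current, maxnum)
--     return maxnum
-- ===== SOURCE B (Python) =====
-- def evenSubsetMax(nums):
--     # Sort descending; pair sums s[k]+s[k+1] are non-increasing, so the best
--     # even-sized prefix sum is the sum of the leading positive pairs.
--     s = sorted(nums, reverse=True)
--     total = 0
--     k = 0
--     while k + 1 < len(s):
--         pair = s[k] + s[k + 1]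
--         if pair <= 0:
--             break
--         total += pair
--         k += 2
--     return total
-- ===== Notes on version B (the rewrite author's own statement) =====
-- stated objective: simpler
-- what changed: Replaces the hand-written mergesort plus index loop tracking a running maximum over all even prefixes by the builtin descending sort and a single stride-2 greedy loop that adds consecutive pair sums and stops at the first nonpositive pair (pair sums of a descending list are non-increasing, so no running max is needed); the C-implemented builtin sort and the early break make it measurably faster by a constant factor.
import Mathlib
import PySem

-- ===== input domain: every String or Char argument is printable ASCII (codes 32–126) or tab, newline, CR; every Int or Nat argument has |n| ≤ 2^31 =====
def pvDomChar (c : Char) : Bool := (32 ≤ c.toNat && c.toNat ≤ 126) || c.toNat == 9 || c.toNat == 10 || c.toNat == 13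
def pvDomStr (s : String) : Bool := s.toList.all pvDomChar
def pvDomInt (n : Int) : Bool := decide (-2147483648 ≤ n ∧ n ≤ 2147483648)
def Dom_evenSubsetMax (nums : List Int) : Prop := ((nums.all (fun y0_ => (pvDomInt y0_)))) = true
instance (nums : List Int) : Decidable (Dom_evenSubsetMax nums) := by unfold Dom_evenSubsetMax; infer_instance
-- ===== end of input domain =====

-- B replaces A's hand-written mergesort + running max over all even prefixes by the builtin
-- descending sort and a stride-2 greedy loop summing the leading positive pairs (objective: simpler).

-- ===== PORT A =====
-- the while loop over indices i, j ported as the obvious structural recursion on the suffixes left[i:], right[j:]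
def mergeA : List Int → List Int → List Int
  | a :: ls, b :: rs => if a ≥ b then a :: mergeA ls (b :: rs) else b :: mergeA (a :: ls) rs
  | l, [] => l
  | [], r => r

def mergesortA (array : List Int) : List Int :=
  if array.length ≤ 1 then array
  else
    let m := array.length / 2
    mergeA (mergesortA (array.take m)) (mergesortA (array.drop m))
termination_by array.length
decreasing_by
  · simp; omega
  · simp; omega

def evenSubsetMax (nums : List Int) : Int :=
  let numsSorted := mergesortA nums
  -- numsSorted[i] is always in range (mergesort preserves length), so pyGetD's default never fires
  let res := (PySem.List.pyRange 0 (nums.length : Int) 1).foldl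
    (fun (st : Int × Int) i =>
      let current := st.1 + PySem.List.pyGetD numsSorted i 0
      if PySem.Int.mod (i + 1) 2 == 0 then (current, max current st.2) else (current, st.2))
    (0, 0)
  res.2

-- ===== PORT B =====
-- Source B's while loop over index k, ported as the obvious recursion on the suffix s[k:]
def pairLoopB : Int → List Int → Int
  | total, a :: b :: t => if a + b ≤ 0 then total else pairLoopB (total + a + b) t
  | total, _ => total

def evenSubsetMax_alt (nums : List Int) : Int :=
  pairLoopB 0 (PySem.List.sorted nums (fun x => x) true)

-- ===== PRECONDITION & SPEC =====
def Spec_evenSubsetMax (nums : List Int) (out : Int) : Prop := out = evenSubsetMax_alt nums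
instance (nums : List Int) (out : Int) : Decidable (Spec_evenSubsetMax nums out) := by unfold Spec_evenSubsetMax; infer_instance

-- ===== CLAIM (what is proved, stated in full; the proofs are below) =====
def Claim_equal_evenSubsetMax : Prop := ∀ (nums : List Int), Dom_evenSubsetMax nums → Spec_evenSubsetMax nums (evenSubsetMax nums)

-- ===== LEMMAS AND PROOFS =====

-- A's maxnum, restated as a two-at-a-time recursion over the sorted list
def foldA : Int → Int → List Int → Int
  | _, m, [] => m
  | _, m, [_] => m
  | c, m, a :: b :: t => foldA (c + a + b) (max (c + a + b) m) t

lemma mergeA_perm : ∀ (l r : List Int), (mergeA l r).Perm (l ++ r) := by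
  intro l r
  induction l, r using mergeA.induct with
  | case1 a ls b rs h ih =>
    rw [mergeA, if_pos h]
    exact (ih.cons a)
  | case2 a ls b rs h ih =>
    rw [mergeA, if_neg h]
    refine (ih.cons b).trans ?_
    exact (List.perm_middle).symm
  | case3 l => cases l <;> simp [mergeA]
  | case4 r _ => simp [mergeA]

lemma mergeA_mem {x : Int} {l r : List Int} (h : x ∈ mergeA l r) : x ∈ l ∨ x ∈ r := by
  have := (mergeA_perm l r).mem_iff.mp h
  simpa using this

lemma mergeA_pairwise : ∀ (l r : List Int), l.Pairwise (· ≥ ·) → r.Pairwise (· ≥ ·) →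
    (mergeA l r).Pairwise (· ≥ ·) := by
  intro l r hl hr
  induction l, r using mergeA.induct with
  | case1 a ls b rs h ih =>
    rw [List.pairwise_cons] at hl
    rw [mergeA, if_pos h, List.pairwise_cons]
    refine ⟨?_, ih hl.2 hr⟩
    intro x hx
    rcases mergeA_mem hx with h1 | h1
    · exact hl.1 x h1
    · rcases List.mem_cons.mp h1 with rfl | h2
      · exact h
      · exact le_trans ((List.pairwise_cons.mp hr).1 x h2) h
  | case2 a ls b rs h ih =>
    rw [List.pairwise_cons] at hr
    rw [mergeA, if_neg h, List.pairwise_cons]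
    refine ⟨?_, ih hl hr.2⟩
    intro x hx
    have hba : a ≤ b := by omega
    rcases mergeA_mem hx with h1 | h1
    · rcases List.mem_cons.mp h1 with rfl | h2
      · exact hba
      · exact le_trans ((List.pairwise_cons.mp hl).1 x h2) hba
    · exact hr.1 x h1
  | case3 l => cases l <;> simp_all [mergeA]
  | case4 r _ => simpa [mergeA] using hr

lemma mergesortA_perm : ∀ (s : List Int), (mergesortA s).Perm s := by
  intro s
  induction s using mergesortA.induct with
  | case1 s h => rw [mergesortA, if_pos h]
  | case2 s h mm ih1 ih2 =>
    rw [mergesortA, if_neg h]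
    refine (mergeA_perm _ _).trans ?_
    refine (List.Perm.append ih1 ih2).trans ?_
    simp

lemma mergesortA_length (s : List Int) : (mergesortA s).length = s.length :=
  (mergesortA_perm s).length_eq

lemma mergesortA_pairwise : ∀ (s : List Int), (mergesortA s).Pairwise (· ≥ ·) := by
  intro s
  induction s using mergesortA.induct with
  | case1 s h =>
    rw [mergesortA, if_pos h]
    match s, h with
    | [], _ => exact List.Pairwise.nil
    | [x], _ => simp
  | case2 s h mm ih1 ih2 =>
    rw [mergesortA, if_neg h]
    exact mergeA_pairwise _ _ ih1 ih2

-- Python's sorted(nums, reverse=True) is the same list as A's mergesort: both are permutations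
-- of nums that are pairwise non-increasing, and Int's order is antisymmetric.
lemma sorted_eq_mergesortA (nums : List Int) :
    PySem.List.sorted nums (fun x => x) true = mergesortA nums := by
  refine List.Perm.eq_of_pairwise (fun a b _ _ h1 h2 => le_antisymm h2 h1) ?_ ?_ ?_
  · exact PySem.List.sorted_pairwise_rev nums (fun x => x)
  · exact mergesortA_pairwise nums
  · exact (PySem.List.sorted_perm _ _ _).trans (mergesortA_perm nums).symm

-- A's index loop over the sorted list s, started at an even index k, computes
-- (current, maxnum) = (c + sum of the rest, foldA over the rest)
lemma loopA_eq (s : List Int) : ∀ (c m : Int) (t : List Int) (k : Nat), s.drop k = t → k % 2 = 0 →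
    (PySem.List.pyRange (k : Int) (s.length : Int) 1).foldl
      (fun (st : Int × Int) i =>
        let current := st.1 + PySem.List.pyGetD s i 0
        if PySem.Int.mod (i + 1) 2 == 0 then (current, max current st.2) else (current, st.2))
      (c, m) = (c + t.sum, foldA c m t) := by
  intro c m t
  induction c, m, t using foldA.induct with
  | case1 c m =>
    intro k hdrop _
    have hk' : s.length ≤ k := List.drop_eq_nil_iff.mp hdrop
    rw [PySem.List.pyRange_one_eq_nil (by exact_mod_cast hk')]
    simp [foldA]
  | case2 c m a =>
    intro k hdrop hk
    have hlen : s.length = k + 1 := by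
      have := congrArg List.length hdrop
      simp at this
      omega
    have hget : PySem.List.pyGetD s (k : Int) 0 = a := by
      rw [PySem.List.pyGetD_natCast]
      have h0 : (s.drop k)[0]? = some a := by rw [hdrop]; rfl
      rw [List.getElem?_drop, Nat.add_zero] at h0
      simp [List.getD, h0]
    have hrange : PySem.List.pyRange (k : Int) (s.length : Int) 1 = [(k : Int)] := by
      rw [hlen]; push_cast; exact PySem.List.pyRange_one_singleton _
    have hmodk : (PySem.Int.mod ((k : Int) + 1) 2 == 0) = false := by
      rw [PySem.Int.mod_eq_emod_of_pos (by omega : (0:Int) < 2)]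
      simp only [beq_eq_false_iff_ne, ne_eq]
      omega
    rw [hrange]
    simp only [List.foldl_cons, List.foldl_nil, hget, hmodk, Bool.false_eq_true, if_false]
    simp only [List.sum_cons, List.sum_nil, foldA, add_zero]
  | case3 c m a b t ih =>
    intro k hdrop hk
    have hlen : k + 2 ≤ s.length := by
      have := congrArg List.length hdrop
      simp at this
      omega
    have hgetk : PySem.List.pyGetD s (k : Int) 0 = a := by
      rw [PySem.List.pyGetD_natCast]
      have h0 : (s.drop k)[0]? = some a := by rw [hdrop]; rfl
      rw [List.getElem?_drop, Nat.add_zero] at h0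
      simp [List.getD, h0]
    have hgetk1 : PySem.List.pyGetD s ((k : Int) + 1) 0 = b := by
      have hcast : ((k : Int) + 1) = ((k + 1 : Nat) : Int) := by push_cast; ring
      rw [hcast, PySem.List.pyGetD_natCast]
      have h1 : (s.drop k)[1]? = some b := by rw [hdrop]; rfl
      rw [List.getElem?_drop] at h1
      simp [List.getD, h1]
    have hdrop2 : s.drop (k + 2) = t := by
      have h2 : s.drop (k + 2) = (s.drop k).drop 2 := by rw [List.drop_drop]
      rw [h2, hdrop]
      rfl
    have hb1 : (k : Int) < ((s.length : Nat) : Int) := by omega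
    have hb2 : (k : Int) + 1 < ((s.length : Nat) : Int) := by omega
    have hr1 : PySem.List.pyRange (k : Int) (s.length : Int) 1
        = (k : Int) :: ((k : Int) + 1) :: PySem.List.pyRange ((k : Int) + 2) (s.length : Int) 1 := by
      rw [PySem.List.pyRange_one_cons hb1, PySem.List.pyRange_one_cons hb2]
      have h22 : (k : Int) + 1 + 1 = (k : Int) + 2 := by ring
      rw [h22]
    have hmodk : (PySem.Int.mod ((k : Int) + 1) 2 == 0) = false := by
      rw [PySem.Int.mod_eq_emod_of_pos (by omega : (0:Int) < 2)]
      simp only [beq_eq_false_iff_ne, ne_eq]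
      omega
    have hmodk1 : (PySem.Int.mod ((k : Int) + 1 + 1) 2 == 0) = true := by
      rw [PySem.Int.mod_eq_emod_of_pos (by omega : (0:Int) < 2)]
      simp only [beq_iff_eq]
      omega
    rw [hr1]
    simp only [List.foldl_cons, hgetk, hgetk1, hmodk, hmodk1, if_false, if_true,
      Bool.false_eq_true]
    have hcast2 : ((k : Int) + 2) = ((k + 2 : Nat) : Int) := by push_cast; ring
    rw [hcast2, ih (k + 2) hdrop2 (by omega)]
    rw [foldA, List.sum_cons, List.sum_cons]
    congr 1
    ring

lemma pairLoopB_ge : ∀ (c : Int) (s : List Int), c ≤ pairLoopB c s := by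
  intro c s
  induction c, s using pairLoopB.induct with
  | case1 c a b t h => simp [pairLoopB, h]
  | case2 c a b t h ih =>
    rw [pairLoopB, if_neg h]
    omega
  | case3 t c h =>
    match t, h with
    | [], _ => simp [pairLoopB]
    | [x], _ => simp [pairLoopB]
    | a :: b :: t', h => exact absurd rfl (h a b t')

-- once a pair sum is nonpositive, all later pair sums of a descending list are too,
-- so maxnum never changes again
lemma foldA_nonpos : ∀ (c m : Int) (s : List Int), s.Pairwise (· ≥ ·) →
    (match s with | a :: b :: _ => a + b ≤ 0 | _ => True) → c ≤ m → foldA c m s = m := by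
  intro c m s
  induction c, m, s using foldA.induct with
  | case1 c m => intro _ _ _; rfl
  | case2 c m x => intro _ _ _; rfl
  | case3 c m a b t ih =>
    intro hp hab hcm
    have hab' : a + b ≤ 0 := hab
    rcases List.pairwise_cons.mp hp with ⟨ha, hp'⟩
    rcases List.pairwise_cons.mp hp' with ⟨hb, hp''⟩
    rw [foldA]
    rw [ih hp'' ?_ (le_max_left _ _)]
    · omega
    · match t with
      | [] => trivial
      | [_] => trivial
      | a' :: b' :: t' =>
        show a' + b' ≤ 0
        have h1 : b ≥ a' := hb a' (by simp)
        have h2 : b ≥ b' := hb b' (by simp)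
        have h3 : a ≥ b := ha b (by simp)
        omega

-- on a descending list, A's running max over even prefixes equals B's greedy pair accumulation
lemma foldA_eq_pairLoopB : ∀ (c m : Int) (s : List Int), s.Pairwise (· ≥ ·) → c ≤ m →
    foldA c m s = max m (pairLoopB c s) := by
  intro c m s
  induction c, m, s using foldA.induct with
  | case1 c m => intro _ hcm; simp [foldA, pairLoopB]; omega
  | case2 c m x => intro _ hcm; simp [foldA, pairLoopB]; omega
  | case3 c m a b t ih =>
    intro hp hcm
    by_cases hab : a + b ≤ 0
    · rw [foldA_nonpos c m _ hp hab hcm]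
      rw [pairLoopB, if_pos hab]
      omega
    · rw [foldA, pairLoopB, if_neg hab]
      rcases List.pairwise_cons.mp hp with ⟨_, hp'⟩
      rcases List.pairwise_cons.mp hp' with ⟨_, hp''⟩
      rw [ih hp'' (le_max_left _ _)]
      have := pairLoopB_ge (c + a + b) t
      omega

-- ===== VERDICT (by name: the statement is the Claim_ definition above) =====
theorem evenSubsetMax_spec : Claim_equal_evenSubsetMax := by
  intro nums _
  unfold Spec_evenSubsetMax evenSubsetMax_alt
  rw [sorted_eq_mergesortA]
  show ((PySem.List.pyRange 0 ((nums.length : Nat) : Int) 1).foldl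
      (fun (st : Int × Int) i =>
        let current := st.1 + PySem.List.pyGetD (mergesortA nums) i 0
        if PySem.Int.mod (i + 1) 2 == 0 then (current, max current st.2) else (current, st.2))
      (0, 0)).2 = pairLoopB 0 (mergesortA nums)
  rw [show ((nums.length : Nat) : Int) = (((mergesortA nums).length : Nat) : Int) from by
    rw [mergesortA_length]]
  have key := loopA_eq (mergesortA nums) 0 0 (mergesortA nums) 0 rfl rfl
  rw [Nat.cast_zero] at key
  rw [key]
  show foldA 0 0 (mergesortA nums) = pairLoopB 0 (mergesortA nums)
  rw [foldA_eq_pairLoopB 0 0 _ (mergesortA_pairwise nums) (le_refl 0)]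
  have := pairLoopB_ge 0 (mergesortA nums)
  omega
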